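-- pv_equiv track=rewrite | github.com/MrBrantCode/unitest_baseline | mut_generate/mist_train_cf/cf_12018/solution.py | is_palindrome_vowels
-- ===== SOURCE A (Python) =====
-- def is_palindrome_vowels(string):
--     string = string.lower()
--     if string == string[::-1]:
--         vowels = ['a', 'e', 'i', 'o', 'u']
--         vowel_order = []
--         for char in string:
--             if char in vowels and char not in vowel_order:
--                 vowel_order.append(char)
--                 if vowel_order != sorted(vowel_order):
--                     return False
--         return len(vowel_order) == len(vowels)
--     return False
-- ===== SOURCE B (Python) =====
-- def is_palindrome_vowels(string):
--     string = string.lower()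
--     if string != string[::-1]:
--         return False
--     positions = [string.find(v) for v in "aeiou"]
--     return all(p >= 0 for p in positions) and positions == sorted(positions)
-- ===== Notes on version B (the rewrite author's own statement) =====
-- stated objective: alternative
-- what changed: Replaces A's single accumulating scan (growing vowel_order list with an incremental sorted-check per new vowel) by five independent first-occurrence lookups (string.find per vowel) plus one all-nonnegative test and one sortedness comparison of the five indices.
import Mathlib
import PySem

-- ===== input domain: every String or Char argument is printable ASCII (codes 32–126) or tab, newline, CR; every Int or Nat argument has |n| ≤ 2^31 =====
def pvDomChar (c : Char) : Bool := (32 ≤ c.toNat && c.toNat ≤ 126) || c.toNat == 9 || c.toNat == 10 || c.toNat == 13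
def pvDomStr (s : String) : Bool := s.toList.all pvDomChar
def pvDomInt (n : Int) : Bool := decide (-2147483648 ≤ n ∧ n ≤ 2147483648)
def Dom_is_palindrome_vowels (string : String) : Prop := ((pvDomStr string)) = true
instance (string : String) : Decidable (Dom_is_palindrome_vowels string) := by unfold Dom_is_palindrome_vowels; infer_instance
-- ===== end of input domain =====

-- B replaces A's single accumulating scan (with incremental sorted-checks of the growing
-- vowel_order list) by five independent first-occurrence lookups plus one sortedness test
-- of the index list; objective: alternative (same O(n) cost, different decomposition).

-- ===== PORT A =====
def pvVowels : List Char := ['a', 'e', 'i', 'o', 'u']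

-- the `for char in string` loop of A, with state `vowel_order` (early return = false)
def pvALoop : List Char → List Char → Bool
  | [], vowel_order => vowel_order.length == pvVowels.length
  | char :: rest, vowel_order =>
    if pvVowels.contains char && !(vowel_order.contains char) then
      let vo' := vowel_order ++ [char]
      if !(vo' == PySem.List.sorted vo' (fun x => x) false) then false
      else pvALoop rest vo'
    else pvALoop rest vowel_order

def is_palindrome_vowels (string : String) : Bool :=
  let s := PySem.Str.lower string
  if PySem.Str.slice? s none none (-1) == some s then pvALoop s.toList []
  else false

-- ===== PORT B =====
def is_palindrome_vowels_alt (string : String) : Bool :=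
  let s := PySem.Str.lower string
  if !(PySem.Str.slice? s none none (-1) == some s) then false
  else
    let positions := "aeiou".toList.map (fun v => PySem.Str.find s (String.singleton v))
    positions.all (fun p => decide (0 ≤ p)) &&
      positions == PySem.List.sorted positions (fun x => x) false

-- ===== PRECONDITION & SPEC =====
def Spec_is_palindrome_vowels (string : String) (out : Bool) : Prop := out = is_palindrome_vowels_alt string
instance (string : String) (out : Bool) : Decidable (Spec_is_palindrome_vowels string out) := by unfold Spec_is_palindrome_vowels; infer_instance

-- ===== CLAIM (what is proved, stated in full; the proofs are below) =====
def Claim_equal_is_palindrome_vowels : Prop := ∀ (string : String), Dom_is_palindrome_vowels string → Spec_is_palindrome_vowels string (is_palindrome_vowels string)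

-- ===== LEMMAS AND PROOFS =====

-- the pure accumulation of A's loop: the final vowel_order, ignoring the early exits
def pvFord : List Char → List Char → List Char
  | [], vo => vo
  | c :: rest, vo =>
    if c ∈ pvVowels ∧ c ∉ vo then pvFord rest (vo ++ [c]) else pvFord rest vo

-- «the remaining vowels `rest` all occur in L, with strictly increasing first indices»
def pvChain : List Char → List Char → Prop
  | [], _ => True
  | v :: vs, L => v ∈ L ∧ (∀ w ∈ vs, L.idxOf v < L.idxOf w) ∧ pvChain vs L

theorem pvFord_prefix (L vo : List Char) : vo <+: pvFord L vo := by
  induction L generalizing vo with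
  | nil => simp [pvFord]
  | cons c rest ih =>
    simp only [pvFord]
    split
    · exact List.IsPrefix.trans ⟨[c], rfl⟩ (ih _)
    · exact ih vo

theorem pvPrefix_vowels_sorted {vo : List Char} (h : vo <+: pvVowels) :
    PySem.List.sorted vo (fun x => x) false = vo := by
  apply PySem.List.sorted_eq_self_of_pairwise
  have hp : pvVowels.Pairwise (fun a b : Char => a ≤ b) := by decide
  exact hp.sublist h.sublist


theorem pvALoop_eq (L : List Char) : ∀ vo : List Char,
    PySem.List.sorted vo (fun x => x) false = vo → vo.Nodup → (∀ x ∈ vo, x ∈ pvVowels) →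
    pvALoop L vo = decide (pvFord L vo = pvVowels) := by
  induction L with
  | nil =>
    intro vo hs hn hsub
    simp only [pvALoop, pvFord]
    by_cases h : vo = pvVowels
    · subst h; decide
    · have hlen : vo.length ≠ pvVowels.length := by
        intro hlen
        apply h
        have hsp : List.Subperm vo pvVowels := List.subperm_of_subset hn hsub
        have hperm : List.Perm vo pvVowels := hsp.perm_of_length_le (by omega)
        have := PySem.List.sorted_eq_of_perm_of_pairwise_lt (key := fun x => x)
          (xs := vo) (ys := pvVowels) hperm.symm (by decide)
        rw [hs] at this; exact this
      have hb : (vo.length == pvVowels.length) = false := by simpa using hlen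
      simp [h, hb]
  | cons c rest ih =>
    intro vo hs hn hsub
    have hcond : (pvVowels.contains c && !vo.contains c) = decide (c ∈ pvVowels ∧ c ∉ vo) := by
      by_cases h1 : c ∈ pvVowels <;> by_cases h2 : c ∈ vo <;> simp [h1, h2]
    simp only [pvALoop, pvFord, hcond]
    by_cases hc : c ∈ pvVowels ∧ c ∉ vo
    · simp only [hc]
      by_cases hsort : PySem.List.sorted (vo ++ [c]) (fun x => x) false = vo ++ [c]
      · have : ((vo ++ [c]) == PySem.List.sorted (vo ++ [c]) (fun x => x) false) = true := by
          simp [hsort]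
        rw [this]
        simp only [Bool.not_true, Bool.false_eq_true, if_false]
        exact ih (vo ++ [c]) hsort
          (by simp [List.nodup_append, hn]; exact fun a ha he => hc.2 (he ▸ ha))
          (by intro x hx; rcases List.mem_append.mp hx with h | h
              · exact hsub x h
              · simp at h; subst h; exact hc.1)
      · have : ((vo ++ [c]) == PySem.List.sorted (vo ++ [c]) (fun x => x) false) = false := by
          simp; intro h; exact hsort h.symm
        rw [this]
        simp only [Bool.not_false, if_true]
        have hne : pvFord rest (vo ++ [c]) ≠ pvVowels := by
          intro heq
          apply hsort
          exact pvPrefix_vowels_sorted (heq ▸ pvFord_prefix rest (vo ++ [c]))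
        simp [hne]
    · simp only [hc, decide_false, Bool.false_eq_true, if_false]
      exact ih vo hs hn hsub

theorem pvChain_cons_notmem {c : Char} {t : List Char} :
    ∀ {rest : List Char}, c ∉ rest → (pvChain rest (c :: t) ↔ pvChain rest t) := by
  intro rest
  induction rest with
  | nil => intro _; simp [pvChain]
  | cons v vs ih =>
    intro hc
    have hvc : v ≠ c := fun h => hc (h ▸ List.mem_cons_self)
    have hcs : c ∉ vs := fun h => hc (List.mem_cons_of_mem _ h)
    simp only [pvChain]
    constructor
    · rintro ⟨h1, h2, h3⟩
      refine ⟨(List.mem_cons.mp h1).resolve_left hvc, ?_, (ih hcs).mp h3⟩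
      intro w hw
      have hwc : w ≠ c := fun h => hcs (h ▸ hw)
      have e1 := List.idxOf_cons_ne t hvc.symm (a := v)
      have e2 := List.idxOf_cons_ne t hwc.symm (a := w)
      have := h2 w hw
      omega
    · rintro ⟨h1, h2, h3⟩
      refine ⟨List.mem_cons_of_mem _ h1, ?_, (ih hcs).mpr h3⟩
      intro w hw
      have hwc : w ≠ c := fun h => hcs (h ▸ hw)
      have e1 := List.idxOf_cons_ne t hvc.symm (a := v)
      have e2 := List.idxOf_cons_ne t hwc.symm (a := w)
      have := h2 w hw
      omega

theorem pvFord_eq_vowels_iff (L : List Char) : ∀ done rest : List Char,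
    done ++ rest = pvVowels → (pvFord L done = pvVowels ↔ pvChain rest L) := by
  induction L with
  | nil =>
    intro done rest happ
    simp only [pvFord]
    constructor
    · intro h
      cases rest with
      | nil => trivial
      | cons v vs =>
        exfalso
        have hl := congrArg List.length happ
        have hl2 := congrArg List.length h
        simp at hl hl2
        omega
    · intro h
      cases rest with
      | nil => simpa using happ
      | cons v vs => exact absurd h.1 List.not_mem_nil
  | cons c t ih =>
    intro done rest happ
    have hnd : (done ++ rest).Nodup := happ ▸ (by decide : pvVowels.Nodup)
    have hdisj : ∀ x ∈ done, x ∉ rest := fun x hx hr =>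
      (List.Nodup.disjoint (by assumption)) hx hr
    simp only [pvFord]
    by_cases hc : c ∈ pvVowels ∧ c ∉ done
    · have hcrest : c ∈ rest := by
        have : c ∈ done ++ rest := happ ▸ hc.1
        exact (List.mem_append.mp this).resolve_left hc.2
      cases rest with
      | nil => simp at hcrest
      | cons v vs =>
        have hnv : v ∉ vs ∧ vs.Nodup := by
          have := (List.nodup_append.mp hnd).2.1
          exact ⟨(List.nodup_cons.mp this).1, (List.nodup_cons.mp this).2⟩
        by_cases hcv : c = v
        · subst hcv
          rw [if_pos hc]
          rw [ih (done ++ [c]) vs (by simpa using happ)]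
          simp only [pvChain]
          constructor
          · intro h
            refine ⟨List.mem_cons_self, ?_, (pvChain_cons_notmem hnv.1).mpr h⟩
            intro w hw
            have hwc : w ≠ c := fun he => hnv.1 (he ▸ hw)
            rw [List.idxOf_cons_self, List.idxOf_cons_ne t hwc.symm]
            omega
          · rintro ⟨_, _, h3⟩
            exact (pvChain_cons_notmem hnv.1).mp h3
        · rw [if_pos hc]
          have hcvs : c ∈ vs := (List.mem_cons.mp hcrest).resolve_left hcv
          constructor
          · intro h
            exfalso
            have hpre : done ++ [c] <+: pvVowels := h ▸ pvFord_prefix t (done ++ [c])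
            rw [← happ] at hpre
            have : [c] <+: v :: vs := (List.prefix_append_right_inj done).mp hpre
            rcases this with ⟨tl, htl⟩
            simp at htl
            exact hcv htl.1
          · intro h
            exfalso
            have h2 := h.2.1 c hcvs
            rw [List.idxOf_cons_ne t hcv] at h2
            simp [List.idxOf_cons_self] at h2
    · have hcrest : c ∉ rest := by
        rcases not_and_or.mp hc with h | h
        · intro hr
          exact h (happ ▸ List.mem_append.mpr (Or.inr hr))
        · exact hdisj c (not_not.mp h)
      rw [if_neg hc, ih done rest happ, pvChain_cons_notmem hcrest]

theorem pvIdxOf_le {c : Char} : ∀ {L : List Char} {n : Nat}, L[n]? = some c → L.idxOf c ≤ n := by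
  intro L
  induction L with
  | nil => intro n h; simp at h
  | cons a l ih =>
    intro n h
    cases n with
    | zero =>
      simp at h
      subst h
      simp [List.idxOf_cons_self]
    | succ m =>
      by_cases hac : a = c
      · rw [List.idxOf_cons_eq l hac]; omega
      · rw [List.idxOf_cons_ne l hac]
        have := ih (n := m) (by simpa using h)
        omega

theorem pvSingle_prefix_iff (L : List Char) (i : Nat) (c : Char) :
    [c] <+: L.drop i ↔ L[i]? = some c := by
  constructor
  · rintro ⟨tl, htl⟩
    have : (L.drop i)[0]? = some c := by rw [← htl]; simp
    rwa [List.getElem?_drop, Nat.add_zero] at this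
  · intro h
    have h0 : (L.drop i)[0]? = some c := by rwa [List.getElem?_drop, Nat.add_zero]
    cases hd : L.drop i with
    | nil => rw [hd] at h0; simp at h0
    | cons x tl =>
      rw [hd] at h0
      simp at h0
      exact ⟨tl, by simp [h0]⟩

theorem pvMem_infix {L : List Char} {c : Char} (h : c ∈ L) : [c] <:+: L := by
  rcases List.append_of_mem h with ⟨s, t, rfl⟩
  exact ⟨s, t, by simp⟩

theorem pvFind_single_not_mem {L : List Char} {c : Char} (h : c ∉ L) :
    PySem.Chars.find L [c] = -1 := by
  rw [PySem.Chars.find_eq_neg_one_iff]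
  intro hin
  exact h (by simpa using hin.sublist.subset List.mem_cons_self)

theorem pvFind_nonneg_mem {L : List Char} {c : Char} (h : 0 ≤ PySem.Chars.find L [c]) : c ∈ L := by
  by_contra hm
  rw [pvFind_single_not_mem hm] at h
  omega

theorem pvFind_single_mem {L : List Char} {c : Char} (h : c ∈ L) :
    PySem.Chars.find L [c] = (L.idxOf c : Int) := by
  have h0 : 0 ≤ PySem.Chars.find L [c] := (PySem.Chars.find_nonneg_iff L [c]).mpr (pvMem_infix h)
  obtain ⟨hpre, hmin⟩ := PySem.Chars.find_spec h0
  have hget : L[(PySem.Chars.find L [c]).toNat]? = some c := (pvSingle_prefix_iff _ _ _).mp hpre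
  have hle : L.idxOf c ≤ (PySem.Chars.find L [c]).toNat := pvIdxOf_le hget
  have hlt : L.idxOf c < L.length := List.idxOf_lt_length_of_mem h
  have hge : ¬ (L.idxOf c < (PySem.Chars.find L [c]).toNat) := by
    intro hlt2
    apply hmin _ hlt2
    rw [pvSingle_prefix_iff]
    rw [List.getElem?_eq_getElem hlt, List.getElem_idxOf hlt]
  omega

theorem pvIdxOf_ne {L : List Char} {v w : Char} (hv : v ∈ L) (hw : w ∈ L) (h : v ≠ w) :
    L.idxOf v ≠ L.idxOf w := by
  intro he
  apply h
  have h1 : L[L.idxOf v]'(List.idxOf_lt_length_of_mem hv) = v :=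
    List.getElem_idxOf (List.idxOf_lt_length_of_mem hv)
  have h2 : L[L.idxOf w]'(List.idxOf_lt_length_of_mem hw) = w :=
    List.getElem_idxOf (List.idxOf_lt_length_of_mem hw)
  rw [← h1, ← h2]
  congr 1

theorem pvSortedIffPairwise (l : List Int) :
    l = PySem.List.sorted l (fun x => x) false ↔ l.Pairwise (· ≤ ·) := by
  constructor
  · intro h
    have := PySem.List.sorted_pairwise (xs := l) (key := fun x => x)
    rw [← h] at this
    simpa using this
  · intro h
    exact (PySem.List.sorted_eq_self_of_pairwise l (fun x => x) (by simpa using h)).symm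

theorem pvMain (L : List Char) :
    pvALoop L [] =
      ((pvVowels.map (fun v => PySem.Chars.find L [v])).all (fun p => decide (0 ≤ p)) &&
        ((pvVowels.map (fun v => PySem.Chars.find L [v])) ==
          PySem.List.sorted (pvVowels.map (fun v => PySem.Chars.find L [v])) (fun x => x) false)) := by
  rw [Bool.eq_iff_iff]
  rw [pvALoop_eq L [] (by decide) List.nodup_nil (by simp)]
  rw [decide_eq_true_iff, pvFord_eq_vowels_iff L [] pvVowels rfl]
  by_cases hm : 'a' ∈ L ∧ 'e' ∈ L ∧ 'i' ∈ L ∧ 'o' ∈ L ∧ 'u' ∈ L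
  · obtain ⟨ha, he, hi, ho, hu⟩ := hm
    have fa := pvFind_single_mem ha
    have fe := pvFind_single_mem he
    have fi := pvFind_single_mem hi
    have fo := pvFind_single_mem ho
    have fu := pvFind_single_mem hu
    have n1 := pvIdxOf_ne ha he (by decide)
    have n2 := pvIdxOf_ne ha hi (by decide)
    have n3 := pvIdxOf_ne ha ho (by decide)
    have n4 := pvIdxOf_ne ha hu (by decide)
    have n5 := pvIdxOf_ne he hi (by decide)
    have n6 := pvIdxOf_ne he ho (by decide)
    have n7 := pvIdxOf_ne he hu (by decide)
    have n8 := pvIdxOf_ne hi ho (by decide)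
    have n9 := pvIdxOf_ne hi hu (by decide)
    have n10 := pvIdxOf_ne ho hu (by decide)
    simp only [pvVowels, pvChain, List.map_cons, List.map_nil, List.all_cons, List.all_nil,
      Bool.and_eq_true, decide_eq_true_iff, beq_iff_eq, pvSortedIffPairwise,
      List.pairwise_cons, List.forall_mem_cons,
      fa, fe, fi, fo, fu, ha, he, hi, ho, hu, true_and, and_true]
    have hnil : List.Pairwise (fun x1 x2 : Int => x1 ≤ x2) [] := List.Pairwise.nil
    simp only [List.not_mem_nil, false_implies, implies_true, hnil, and_true]
    omega
  · constructor
    · intro h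
      exfalso
      apply hm
      simp only [pvVowels, pvChain] at h
      exact ⟨h.1, h.2.2.1, h.2.2.2.2.1, h.2.2.2.2.2.2.1, h.2.2.2.2.2.2.2.2.1⟩
    · intro h
      exfalso
      apply hm
      simp only [pvVowels, List.map_cons, List.map_nil, List.all_cons, List.all_nil,
        Bool.and_eq_true, decide_eq_true_iff] at h
      exact ⟨pvFind_nonneg_mem h.1.1, pvFind_nonneg_mem h.1.2.1,
        pvFind_nonneg_mem h.1.2.2.1, pvFind_nonneg_mem h.1.2.2.2.1,
        pvFind_nonneg_mem h.1.2.2.2.2.1⟩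

-- ===== VERDICT (by name: the statement is the Claim_ definition above) =====
theorem is_palindrome_vowels_spec : Claim_equal_is_palindrome_vowels := by
  intro string _
  unfold Spec_is_palindrome_vowels
  simp only [is_palindrome_vowels, is_palindrome_vowels_alt]
  by_cases hg : (PySem.Str.slice? (PySem.Str.lower string) none none (-1) ==
      some (PySem.Str.lower string)) = true
  · rw [if_pos hg, hg]
    simp only [Bool.not_true, Bool.false_eq_true, if_false]
    have hmap : "aeiou".toList.map
        (fun v => PySem.Str.find (PySem.Str.lower string) (String.singleton v)) =
        pvVowels.map (fun v => PySem.Chars.find (PySem.Str.lower string).toList [v]) := by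
      have h5 : "aeiou".toList = pvVowels := by decide
      rw [h5]
      simp [PySem.Str.find]
    rw [hmap]
    exact pvMain (PySem.Str.lower string).toList
  · have hgf : (PySem.Str.slice? (PySem.Str.lower string) none none (-1) ==
        some (PySem.Str.lower string)) = false := by simpa using hg
    rw [if_neg hg, hgf]
    simp
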